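-- pv_equiv track=rewrite | github.com/KotsiosJirisSas/ED | utils/space_group_symmetries.py | group_action
-- ===== SOURCE A (Python) =====
-- def T1(s,m):
--     '''
--     Takes a configuration s and Translates it by m sites.
--
--     Args:
--         s(tuple): configuration
--         m(int): number of sites to translate m \in [0,L1)
--     Returns:
--     '''
--     s_up,s_down = s[0],s[1]
--     s_up_t = tuple([s_up[i-m] for i in range(len(s_up))])
--     s_down_t = tuple([s_down[i-m] for i in range(len(s_down))])
--     return (s_up_t,s_down_t)
--
-- def Inv(s):
--     '''
--     Takes configfuration s and inverts it about the centre
--     Could just done [::-1]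
--     Args:
--
--     Returns:
--     '''
--     s_up,s_down = s[0],s[1]
--     s0 = len(s_up)
--     s_up_inv = tuple([s_up[s0-i-1] for i in range(s0)])
--     s_down_inv = tuple([s_down[s0-i-1] for i in range(s0)])
--     return (s_up_inv,s_down_inv)
--
-- def SpinInv(s):
--     '''
--     exchanges the two tuples
--     '''
--     s_up,s_down = s[0],s[1]
--     return (s_down,s_up)
--
-- def group_action(s,m_t,m_inv,m_spin_inv):
--     '''
--
--     Args:
--         s(tuple): Initial state
--         m_t(int): How many times to apply translation; m \in [0,L1)
--         m_inv(int): How many times to apply inversion; m \in [0,1]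
--         m_spin_inv(int): How many times to apply spin inversion; m \in [0,1]
--     Returns:
--         s'(tuple):The state after acting on it with the group
--     '''
--
--     s_temp = s
--     s_temp = T1(s_temp,m=m_t)
--     ind_inv = 0
--     while ind_inv < m_inv:
--         s_temp = Inv(s_temp)
--         ind_inv += 1
--
--     ind_spin_inv = 0
--     while ind_spin_inv < m_spin_inv:
--         s_temp = SpinInv(s_temp)
--         ind_spin_inv += 1
--
--     return s_temp
-- ===== SOURCE B (Python) =====
-- def group_action(s, m_t, m_inv, m_spin_inv):
--     u, d = s[0], s[1]
--     do_inv = m_inv > 0 and m_inv % 2 == 1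
--     do_spin = m_spin_inv > 0 and m_spin_inv % 2 == 1
--
--     def pick(t):
--         L = len(t)
--         return tuple(t[(L - 1 - i if do_inv else i) - m_t] for i in range(L))
--
--     new_u, new_d = pick(u), pick(d)
--     return (new_d, new_u) if do_spin else (new_u, new_d)
-- ===== Notes on version B (the rewrite author's own statement) =====
-- stated objective: faster
-- what changed: Replaces the sequential T1 / while-Inv / while-SpinInv pipeline by a closed-form per-position source index: the parity of the two loop counts decides reversal and spin swap, and each output tuple is built in one pass.
-- intended difference: On inputs with m_inv >= 1 and len(s_up) < len(s_down), A's Inv indexes both tuples by len(s_up) and so silently truncates (or empties) s_down to that length, while B reverses each tuple in full, which is the intended inversion. — e.g. on group_action(([1], [2, 3]), 0, 1, 0): A returns ([1], [2]), B returns ([1], [3, 2])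
import Mathlib
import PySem

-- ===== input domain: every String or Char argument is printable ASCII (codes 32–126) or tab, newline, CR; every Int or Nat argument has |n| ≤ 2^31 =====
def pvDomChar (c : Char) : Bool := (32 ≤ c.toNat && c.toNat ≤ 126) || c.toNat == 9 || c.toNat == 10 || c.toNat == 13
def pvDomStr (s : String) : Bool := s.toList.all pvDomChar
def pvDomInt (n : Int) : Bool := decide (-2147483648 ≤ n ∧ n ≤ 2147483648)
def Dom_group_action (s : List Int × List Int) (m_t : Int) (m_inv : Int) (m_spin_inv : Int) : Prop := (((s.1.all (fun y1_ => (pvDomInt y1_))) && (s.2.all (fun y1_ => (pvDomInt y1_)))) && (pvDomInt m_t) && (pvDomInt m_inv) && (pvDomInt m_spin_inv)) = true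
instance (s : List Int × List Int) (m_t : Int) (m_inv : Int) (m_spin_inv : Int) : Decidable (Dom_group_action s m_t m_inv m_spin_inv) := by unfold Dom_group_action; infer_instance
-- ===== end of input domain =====

-- B replaces A's sequential T1 / while-Inv / while-SpinInv pipeline by a closed-form
-- per-position source index (parity of the loop counts decides reversal and spin swap),
-- one pass per tuple — measurably faster since A applies Inv/SpinInv m times; on
-- unequal-length tuples with inversion applied B reverses each tuple in full where A
-- truncates (see D_ below).

-- ===== PORT A =====
def pyT1 (s : List Int × List Int) (m : Int) : List Int × List Int :=
  ((List.range s.1.length).map (fun (i : Nat) => (PySem.List.pyGet? s.1 ((i : Int) - m)).getD 0),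
   (List.range s.2.length).map (fun (i : Nat) => (PySem.List.pyGet? s.2 ((i : Int) - m)).getD 0))

def pyInv (s : List Int × List Int) : List Int × List Int :=
  let s0 := s.1.length
  ((List.range s0).map (fun (i : Nat) => (PySem.List.pyGet? s.1 ((s0 : Int) - (i : Int) - 1)).getD 0),
   (List.range s0).map (fun (i : Nat) => (PySem.List.pyGet? s.2 ((s0 : Int) - (i : Int) - 1)).getD 0))

def pySpinInv (s : List Int × List Int) : List Int × List Int := (s.2, s.1)

def group_action (s : List Int × List Int) (m_t : Int) (m_inv : Int) (m_spin_inv : Int) : List Int × List Int :=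
  let s1 := pyT1 s m_t
  let s2 := pyInv^[m_inv.toNat] s1          -- the while loop runs max(m_inv,0) times
  pySpinInv^[m_spin_inv.toNat] s2           -- the while loop runs max(m_spin_inv,0) times

-- ===== PORT B =====
def group_action_alt (s : List Int × List Int) (m_t : Int) (m_inv : Int) (m_spin_inv : Int) : List Int × List Int :=
  let u := s.1
  let d := s.2
  let doInv : Bool := decide (0 < m_inv) && decide (PySem.Int.mod m_inv 2 = 1)
  let doSpin : Bool := decide (0 < m_spin_inv) && decide (PySem.Int.mod m_spin_inv 2 = 1)
  let pick : List Int → List Int := fun t =>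
    (List.range t.length).map (fun (i : Nat) =>
      (PySem.List.pyGet? t
        ((if doInv then (t.length : Int) - 1 - (i : Int) else (i : Int)) - m_t)).getD 0)
  if doSpin then (pick d, pick u) else (pick u, pick d)

-- ===== PRECONDITION & SPEC =====
-- Pre_ excludes exactly the inputs where A raises IndexError: a translation count outside
-- [0, len] for a nonempty tuple, or inversion applied while s_down is shorter than s_up
-- (Inv indexes s_down by len(s_up)).
def Pre_group_action (s : List Int × List Int) (m_t : Int) (m_inv : Int) (m_spin_inv : Int) : Prop :=
  (s.1.length = 0 ∨ (0 ≤ m_t ∧ m_t ≤ (s.1.length : Int))) ∧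
  (s.2.length = 0 ∨ (0 ≤ m_t ∧ m_t ≤ (s.2.length : Int))) ∧
  (1 ≤ m_inv → s.1.length ≠ 0 → s.1.length ≤ s.2.length)
instance (s : List Int × List Int) (m_t : Int) (m_inv : Int) (m_spin_inv : Int) : Decidable (Pre_group_action s m_t m_inv m_spin_inv) := by unfold Pre_group_action; infer_instance

def pvWitness_group_action : (List Int × List Int) × Int × Int × Int := (([1, 2], [3, 4]), 1, 1, 1)

-- On inputs with m_inv ≥ 1 and len(s_up) < len(s_down), A's Inv indexes both tuples by
-- len(s_up) and so silently truncates (or empties) s_down to that length, while B reverses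
-- each tuple in full, which is the intended inversion.
def D_group_action (s : List Int × List Int) (m_t : Int) (m_inv : Int) (m_spin_inv : Int) : Prop :=
  1 ≤ m_inv ∧ s.1.length < s.2.length
instance (s : List Int × List Int) (m_t : Int) (m_inv : Int) (m_spin_inv : Int) : Decidable (D_group_action s m_t m_inv m_spin_inv) := by unfold D_group_action; infer_instance

def Spec_group_action (s : List Int × List Int) (m_t : Int) (m_inv : Int) (m_spin_inv : Int) (out : List Int × List Int) : Prop := ¬ D_group_action s m_t m_inv m_spin_inv → out = group_action_alt s m_t m_inv m_spin_inv
instance (s : List Int × List Int) (m_t : Int) (m_inv : Int) (m_spin_inv : Int) (out : List Int × List Int) : Decidable (Spec_group_action s m_t m_inv m_spin_inv out) := by unfold Spec_group_action; infer_instance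

def pvDiffWitness_group_action : (List Int × List Int) × Int × Int × Int := (([1], [2, 3]), 0, 1, 0)
def pvDiffWitnessOut_group_action : (List Int × List Int) × (List Int × List Int) := (([1], [2]), ([1], [3, 2]))

-- ===== CLAIM (what is proved, stated in full; the proofs are below) =====
def Claim_unchanged_group_action : Prop := ∀ (s : List Int × List Int) (m_t : Int) (m_inv : Int) (m_spin_inv : Int), Dom_group_action s m_t m_inv m_spin_inv → Pre_group_action s m_t m_inv m_spin_inv → Spec_group_action s m_t m_inv m_spin_inv (group_action s m_t m_inv m_spin_inv)
def Claim_changed_group_action : Prop := Dom_group_action (pvDiffWitness_group_action.1) (pvDiffWitness_group_action.2.1) (pvDiffWitness_group_action.2.2.1) (pvDiffWitness_group_action.2.2.2) ∧ Pre_group_action (pvDiffWitness_group_action.1) (pvDiffWitness_group_action.2.1) (pvDiffWitness_group_action.2.2.1) (pvDiffWitness_group_action.2.2.2) ∧ D_group_action (pvDiffWitness_group_action.1) (pvDiffWitness_group_action.2.1) (pvDiffWitness_group_action.2.2.1) (pvDiffWitness_group_action.2.2.2) ∧ group_action (pvDiffWitness_group_action.1) (pvDiffWitness_group_action.2.1)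 (pvDiffWitness_group_action.2.2.1) (pvDiffWitness_group_action.2.2.2) = pvDiffWitnessOut_group_action.1 ∧ group_action_alt (pvDiffWitness_group_action.1) (pvDiffWitness_group_action.2.1) (pvDiffWitness_group_action.2.2.1) (pvDiffWitness_group_action.2.2.2) = pvDiffWitnessOut_group_action.2 ∧ pvDiffWitnessOut_group_action.1 ≠ pvDiffWitnessOut_group_action.2
def Claim_exact_group_action : Prop := ∀ (s : List Int × List Int) (m_t : Int) (m_inv : Int) (m_spin_inv : Int), Dom_group_action s m_t m_inv m_spin_inv → Pre_group_action s m_t m_inv m_spin_inv → D_group_action s m_t m_inv m_spin_inv → group_action s m_t m_inv m_spin_inv ≠ group_action_alt s m_t m_inv m_spin_inv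

-- ===== LEMMAS AND PROOFS =====

-- parity of a Python while-counter: the loop body runs max(m,0) times
theorem pv_par (m : Int) :
    (decide (0 < m) && decide (PySem.Int.mod m 2 = 1)) = true ↔ m.toNat % 2 = 1 := by
  by_cases h : 0 < m
  · rw [PySem.Int.mod_eq_emod_of_pos (by norm_num)]
    simp [h]
    omega
  · simp [h]
    omega

theorem pv_spin_iter (n : Nat) (x : List Int × List Int) :
    pySpinInv^[n] x = if n % 2 = 1 then (x.2, x.1) else x := by
  induction n with
  | zero => simp
  | succ k ih =>
    rw [Function.iterate_succ_apply', ih]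
    by_cases h : k % 2 = 1
    · have h2 : ¬ ((k + 1) % 2 = 1) := by omega
      simp [h, h2, pySpinInv]
    · have h2 : (k + 1) % 2 = 1 := by omega
      simp [h, h2, pySpinInv]

theorem pv_rev_map (a : List Int) :
    (List.range a.length).map
        (fun (i : Nat) => (PySem.List.pyGet? a ((a.length : Int) - (i : Int) - 1)).getD 0)
      = a.reverse := by
  apply List.ext_getElem
  · simp
  · intro i h1 h2
    simp only [List.length_map, List.length_range] at h1
    simp only [List.getElem_map, List.getElem_range, List.getElem_reverse]
    rw [PySem.List.pyGet?_of_nonneg a (show (0:Int) ≤ (a.length : Int) - ((i : Nat) : Int) - 1 by omega)]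
    have h3 : ((a.length : Int) - ((i : Nat) : Int) - 1).toNat = a.length - 1 - i := by omega
    rw [h3, List.getElem?_eq_getElem (by omega)]
    rfl

theorem pv_inv_eq_rev (x : List Int × List Int) (h : x.2.length = x.1.length) :
    pyInv x = (x.1.reverse, x.2.reverse) := by
  unfold pyInv
  refine Prod.ext ?_ ?_
  · simpa using pv_rev_map x.1
  · simp only []
    rw [← h]
    simpa using pv_rev_map x.2

theorem pv_inv_iter (n : Nat) (x : List Int × List Int) (h : x.2.length = x.1.length) :
    pyInv^[n] x = if n % 2 = 1 then (x.1.reverse, x.2.reverse) else x := by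
  induction n with
  | zero => simp
  | succ k ih =>
    rw [Function.iterate_succ_apply', ih]
    by_cases hp : k % 2 = 1
    · have h2 : ¬ ((k + 1) % 2 = 1) := by omega
      simp only [hp, if_true, h2, if_false]
      rw [pv_inv_eq_rev (x.1.reverse, x.2.reverse) (by simp [h])]
      simp
    · have h2 : (k + 1) % 2 = 1 := by omega
      simp only [hp, if_false, h2, if_true]
      exact pv_inv_eq_rev x h

-- component equality, net inversion applied: reversing the rotated list picks index L-1-i
theorem pv_inv_comp (a : List Int) (mt : Int) :
    ((List.range a.length).map (fun (i : Nat) => (PySem.List.pyGet? a ((i : Int) - mt)).getD 0)).reverse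
      = (List.range a.length).map
          (fun (i : Nat) => (PySem.List.pyGet? a ((a.length : Int) - 1 - (i : Int) - mt)).getD 0) := by
  apply List.ext_getElem
  · simp
  · intro i h1 h2
    simp only [List.length_reverse, List.length_map, List.length_range] at h1
    simp only [List.getElem_reverse, List.getElem_map, List.getElem_range, List.length_map,
      List.length_range]
    congr 2
    omega

theorem pv_inv_len1 (n : Nat) (x : List Int × List Int) :
    (pyInv^[n] x).1.length = x.1.length := by
  induction n with
  | zero => rfl
  | succ k ih => rw [Function.iterate_succ_apply']; simp [pyInv, ih]

theorem pv_inv_len2 (n : Nat) (x : List Int × List Int) (hn : n ≠ 0) :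
    (pyInv^[n] x).2.length = x.1.length := by
  cases n with
  | zero => exact absurd rfl hn
  | succ k =>
    rw [Function.iterate_succ_apply']
    simp [pyInv, pv_inv_len1]

-- ===== VERDICT (by name: the statement is the Claim_ definition above) =====
theorem group_action_spec : Claim_unchanged_group_action := by
  intro s mt mi ms hdom hpre hnd
  obtain ⟨hp1, hp2, hp3⟩ := hpre
  simp only [group_action, group_action_alt]
  cases hBs : (decide (0 < ms) && decide (PySem.Int.mod ms 2 = 1)) with
  | true =>
    have hks : ms.toNat % 2 = 1 := (pv_par ms).mp hBs
    cases hB : (decide (0 < mi) && decide (PySem.Int.mod mi 2 = 1)) with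
    | true =>
      -- odd number of inversions and a spin swap
      have hki : mi.toNat % 2 = 1 := (pv_par mi).mp hB
      have hmi : 0 < mi := by
        have h := hB
        simp only [Bool.and_eq_true, decide_eq_true_eq] at h
        exact h.1
      have hld : s.2.length ≤ s.1.length := by
        unfold D_group_action at hnd
        omega
      by_cases hLu : s.1.length = 0
      · have h1 : s.1 = [] := by rwa [← List.length_eq_zero_iff]
        have h2 : s.2 = [] := by rw [← List.length_eq_zero_iff]; omega
        have hT : pyT1 s mt = ([], []) := by simp [pyT1, h1, h2]
        have hinv0 : pyInv (([], []) : List Int × List Int) = ([], []) := by simp [pyInv]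
        have hspin0 : pySpinInv (([], []) : List Int × List Int) = ([], []) := rfl
        rw [hT, Function.iterate_fixed hinv0, Function.iterate_fixed hspin0]
        simp [h1, h2]
      · have hL : s.2.length = s.1.length := le_antisymm hld (hp3 (by omega) hLu)
        rw [pv_inv_iter _ _ (by simp [pyT1, hL]), if_pos hki, pv_spin_iter, if_pos hks,
          if_pos rfl]
        simp only [if_true, pyT1]
        exact Prod.ext (pv_inv_comp s.2 mt) (pv_inv_comp s.1 mt)
    | false =>
      -- an even (possibly zero) number of inversions and a spin swap
      have hki : ¬ (mi.toNat % 2 = 1) := fun h => by rw [(pv_par mi).mpr h] at hB; exact Bool.noConfusion hB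
      have hrot : pyInv^[mi.toNat] (pyT1 s mt) = pyT1 s mt := by
        by_cases hmi : 0 < mi
        · have hld : s.2.length ≤ s.1.length := by
            unfold D_group_action at hnd
            omega
          by_cases hLu : s.1.length = 0
          · have h1 : s.1 = [] := by rwa [← List.length_eq_zero_iff]
            have h2 : s.2 = [] := by rw [← List.length_eq_zero_iff]; omega
            have hT : pyT1 s mt = ([], []) := by simp [pyT1, h1, h2]
            have hinv0 : pyInv (([], []) : List Int × List Int) = ([], []) := by simp [pyInv]
            rw [hT, Function.iterate_fixed hinv0]
          · have hL : s.2.length = s.1.length := le_antisymm hld (hp3 (by omega) hLu)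
            rw [pv_inv_iter _ _ (by simp [pyT1, hL]), if_neg hki]
        · have h0 : mi.toNat = 0 := by omega
          rw [h0, Function.iterate_zero_apply]
      rw [hrot, pv_spin_iter, if_pos hks, if_pos rfl]
      simp only [Bool.false_eq_true, if_false, pyT1]
  | false =>
    have hks : ¬ (ms.toNat % 2 = 1) := fun h => by rw [(pv_par ms).mpr h] at hBs; exact Bool.noConfusion hBs
    cases hB : (decide (0 < mi) && decide (PySem.Int.mod mi 2 = 1)) with
    | true =>
      have hki : mi.toNat % 2 = 1 := (pv_par mi).mp hB
      have hmi : 0 < mi := by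
        have h := hB
        simp only [Bool.and_eq_true, decide_eq_true_eq] at h
        exact h.1
      have hld : s.2.length ≤ s.1.length := by
        unfold D_group_action at hnd
        omega
      by_cases hLu : s.1.length = 0
      · have h1 : s.1 = [] := by rwa [← List.length_eq_zero_iff]
        have h2 : s.2 = [] := by rw [← List.length_eq_zero_iff]; omega
        have hT : pyT1 s mt = ([], []) := by simp [pyT1, h1, h2]
        have hinv0 : pyInv (([], []) : List Int × List Int) = ([], []) := by simp [pyInv]
        have hspin0 : pySpinInv (([], []) : List Int × List Int) = ([], []) := rfl
        rw [hT, Function.iterate_fixed hinv0, Function.iterate_fixed hspin0]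
        simp [h1, h2]
      · have hL : s.2.length = s.1.length := le_antisymm hld (hp3 (by omega) hLu)
        rw [pv_inv_iter _ _ (by simp [pyT1, hL]), if_pos hki, pv_spin_iter, if_neg hks,
          if_neg (by simp)]
        simp only [if_true, pyT1]
        exact Prod.ext (pv_inv_comp s.1 mt) (pv_inv_comp s.2 mt)
    | false =>
      have hki : ¬ (mi.toNat % 2 = 1) := fun h => by rw [(pv_par mi).mpr h] at hB; exact Bool.noConfusion hB
      have hrot : pyInv^[mi.toNat] (pyT1 s mt) = pyT1 s mt := by
        by_cases hmi : 0 < mi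
        · have hld : s.2.length ≤ s.1.length := by
            unfold D_group_action at hnd
            omega
          by_cases hLu : s.1.length = 0
          · have h1 : s.1 = [] := by rwa [← List.length_eq_zero_iff]
            have h2 : s.2 = [] := by rw [← List.length_eq_zero_iff]; omega
            have hT : pyT1 s mt = ([], []) := by simp [pyT1, h1, h2]
            have hinv0 : pyInv (([], []) : List Int × List Int) = ([], []) := by simp [pyInv]
            rw [hT, Function.iterate_fixed hinv0]
          · have hL : s.2.length = s.1.length := le_antisymm hld (hp3 (by omega) hLu)
            rw [pv_inv_iter _ _ (by simp [pyT1, hL]), if_neg hki]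
        · have h0 : mi.toNat = 0 := by omega
          rw [h0, Function.iterate_zero_apply]
      rw [hrot, pv_spin_iter, if_neg hks, if_neg (by simp)]
      simp only [Bool.false_eq_true, if_false, pyT1]

theorem group_action_changed : Claim_changed_group_action := by
  unfold Claim_changed_group_action
  decide

theorem group_action_tight : Claim_exact_group_action := by
  intro s mt mi ms hdom hpre hd heq
  obtain ⟨hmi, hlt⟩ := hd
  have hA : (group_action s mt mi ms).1.length + (group_action s mt mi ms).2.length
      = s.1.length + s.1.length := by
    have hki : mi.toNat ≠ 0 := by omega
    have l1 := pv_inv_len1 mi.toNat (pyT1 s mt)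
    have l2 := pv_inv_len2 mi.toNat (pyT1 s mt) hki
    have lt1 : (pyT1 s mt).1.length = s.1.length := by simp [pyT1]
    simp only [group_action]
    rw [pv_spin_iter]
    by_cases hks : ms.toNat % 2 = 1
    · rw [if_pos hks]
      simp only []
      omega
    · rw [if_neg hks]
      omega
  have hB : (group_action_alt s mt mi ms).1.length + (group_action_alt s mt mi ms).2.length
      = s.1.length + s.2.length := by
    simp only [group_action_alt]
    cases hBs : (decide (0 < ms) && decide (PySem.Int.mod ms 2 = 1)) with
    | true =>
      rw [if_pos rfl]
      simp
      omega
    | false =>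
      rw [if_neg (by simp)]
      simp
  rw [heq] at hA
  omega
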